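-- pv_equiv track=rewrite | github.com/NovemberFalls/BITSM | services/email_templates.py | _details_table
-- ===== SOURCE A (Python) =====
-- def _details_table(rows: list[tuple[str, str]]) -> str:
--     """Render a 2-column key-value details grid."""
--     visible = [(label, value) for label, value in rows if value]
--     cells = ""
--     for i in range(0, len(visible), 2):
--         pair = visible[i:i+2]
--         cells += '<tr>'
--         for label, value in pair:
--             cells += (
--                 f'<td style="padding:8px 16px 8px 0;font-size:13px;vertical-align:top;width:50%;">'
--                 f'<span style="display:block;color:#6a737d;font-size:11px;text-transform:uppercase;letter-spacing:0.4px;margin-bottom:2px;">{label}</span>'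
--                 f'<span style="color:#24292e;font-weight:500;">{value}</span>'
--                 f'</td>'
--             )
--         if len(pair) == 1:
--             cells += '<td style="width:50%;"></td>'
--         cells += '</tr>'
--     return f'<table style="margin-top:16px;border-collapse:collapse;width:100%;">{cells}</table>'
-- ===== SOURCE B (Python) =====
-- def _details_table(rows: list[tuple[str, str]]) -> str:
--     """Render a 2-column key-value details grid."""
--     parts = ['<table style="margin-top:16px;border-collapse:collapse;width:100%;">']
--     pending = None
--     for label, value in rows:
--         if not value:
--             continue
--         cell = (
--             '<td style="padding:8px 16px 8px 0;font-size:13px;vertical-align:top;width:50%;">'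
--             f'<span style="display:block;color:#6a737d;font-size:11px;text-transform:uppercase;letter-spacing:0.4px;margin-bottom:2px;">{label}</span>'
--             f'<span style="color:#24292e;font-weight:500;">{value}</span>'
--             '</td>'
--         )
--         if pending is None:
--             pending = cell
--         else:
--             parts.append(f'<tr>{pending}{cell}</tr>')
--             pending = None
--     if pending is not None:
--         parts.append(f'<tr>{pending}<td style="width:50%;"></td></tr>')
--     parts.append('</table>')
--     return ''.join(parts)
-- ===== Notes on version B (the rewrite author's own statement) =====
-- stated objective: alternative
-- what changed: B is a single streaming pass over the raw rows driven by a pending-left-cell state machine (skip falsy values, hold the first cell of a row, emit a complete <tr> the moment its partner arrives, flush a dangling cell with the padding <td> after the loop), instead of A's two-phase materialize-the-filtered-list then index-step-by-2 slice-pair loop; no filtered list and no pair slices are ever built.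
import Mathlib
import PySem

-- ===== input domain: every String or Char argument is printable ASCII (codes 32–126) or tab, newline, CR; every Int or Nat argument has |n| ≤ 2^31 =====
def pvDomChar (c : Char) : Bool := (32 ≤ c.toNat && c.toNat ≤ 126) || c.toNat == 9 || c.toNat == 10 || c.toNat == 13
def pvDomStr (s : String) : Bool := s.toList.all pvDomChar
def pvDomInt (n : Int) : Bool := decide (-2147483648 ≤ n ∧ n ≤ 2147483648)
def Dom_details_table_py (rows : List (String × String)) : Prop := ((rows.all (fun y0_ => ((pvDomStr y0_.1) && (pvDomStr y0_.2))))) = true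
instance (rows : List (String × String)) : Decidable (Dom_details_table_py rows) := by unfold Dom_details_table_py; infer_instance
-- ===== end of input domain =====

-- B replaces A's filter-then-index-step-by-2 slice-pair loop by ONE streaming pass over the
-- raw rows with a pending-left-cell state machine; objective: alternative (same cost).

-- ===== PORT A =====
def detailsTd (label value : String) : String :=
  "<td style=\"padding:8px 16px 8px 0;font-size:13px;vertical-align:top;width:50%;\">"
  ++ "<span style=\"display:block;color:#6a737d;font-size:11px;text-transform:uppercase;letter-spacing:0.4px;margin-bottom:2px;\">" ++ label ++ "</span>"
  ++ "<span style=\"color:#24292e;font-weight:500;\">" ++ value ++ "</span>"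
  ++ "</td>"

-- the body of A's 'for i in range(0, len(visible), 2)' loop, step for step
def detailsRowStep (visible : List (String × String)) (cells : String) (i : Int) : String :=
  let pair := PySem.List.slice visible (some i) (some (i + 2))
  let cells := cells ++ "<tr>"
  let cells := pair.foldl (fun c lv => c ++ detailsTd lv.1 lv.2) cells
  let cells := if pair.length == 1 then cells ++ "<td style=\"width:50%;\"></td>" else cells
  cells ++ "</tr>"

def details_table_py (rows : List (String × String)) : String :=
  let visible := rows.filter (fun lv => lv.2 != "")
  let cells := (PySem.List.pyRange 0 (visible.length : Int) 2).foldl (detailsRowStep visible) ""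
  "<table style=\"margin-top:16px;border-collapse:collapse;width:100%;\">" ++ cells ++ "</table>"

-- ===== PORT B =====
def altCell (lv : String × String) : String :=
  "<td style=\"padding:8px 16px 8px 0;font-size:13px;vertical-align:top;width:50%;\">"
  ++ "<span style=\"display:block;color:#6a737d;font-size:11px;text-transform:uppercase;letter-spacing:0.4px;margin-bottom:2px;\">" ++ lv.1 ++ "</span>"
  ++ "<span style=\"color:#24292e;font-weight:500;\">" ++ lv.2 ++ "</span>"
  ++ "</td>"

-- one iteration of B's streaming loop: state = (parts emitted so far, pending left cell)
def altStep (st : List String × Option String) (lv : String × String) : List String × Option String :=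
  if lv.2 == "" then st
  else
    let cell := altCell lv
    match st.2 with
    | none => (st.1, some cell)
    | some p => (st.1 ++ ["<tr>" ++ p ++ cell ++ "</tr>"], none)

-- after the loop: flush a dangling pending cell with the padding <td>
def altFinish (st : List String × Option String) : List String :=
  match st.2 with
  | none => st.1
  | some p => st.1 ++ ["<tr>" ++ p ++ "<td style=\"width:50%;\"></td>" ++ "</tr>"]

def details_table_py_alt (rows : List (String × String)) : String :=
  let st := rows.foldl altStep
    (["<table style=\"margin-top:16px;border-collapse:collapse;width:100%;\">"], none)
  String.join (altFinish st ++ ["</table>"])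

-- ===== PRECONDITION & SPEC =====
def Spec_details_table_py (rows : List (String × String)) (out : String) : Prop := out = details_table_py_alt rows
instance (rows : List (String × String)) (out : String) : Decidable (Spec_details_table_py rows out) := by unfold Spec_details_table_py; infer_instance

-- ===== CLAIM (what is proved, stated in full; the proofs are below) =====
def Claim_equal_details_table_py : Prop := ∀ (rows : List (String × String)), Dom_details_table_py rows → Spec_details_table_py rows (details_table_py rows)

-- ===== LEMMAS AND PROOFS =====

-- proof-side bridge: the pairs-of-cells view of the output rows
def altPairs : List String → List (String × String)
  | [] => []
  | [c] => [(c, "<td style=\"width:50%;\"></td>")]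
  | l :: r :: rest => (l, r) :: altPairs rest

def altRow (pr : String × String) : String := "<tr>" ++ pr.1 ++ pr.2 ++ "</tr>"

-- B's step with the falsy-value guard stripped (used on the filtered list)
def altStepV (st : List String × Option String) (lv : String × String) : List String × Option String :=
  match st.2 with
  | none => (st.1, some (altCell lv))
  | some p => (st.1 ++ ["<tr>" ++ p ++ altCell lv ++ "</tr>"], none)

theorem slice_take2 {α : Type} (xs : List α) :
    PySem.List.slice xs none (some 2) = xs.take 2 := by
  have h := PySem.List.slice_to xs (b := 2) (by norm_num)
  rw [h]
  rfl

theorem foldl_str_append (l : List String) (a b : String) :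
    l.foldl (fun s x => s ++ x) (a ++ b) = a ++ l.foldl (fun s x => s ++ x) b := by
  induction l generalizing b with
  | nil => rfl
  | cons h t ih => simp only [List.foldl_cons, String.append_assoc, ih]

theorem join_nil : String.join ([] : List String) = "" := rfl

theorem join_cons (s : String) (l : List String) :
    String.join (s :: l) = s ++ String.join l := by
  show l.foldl (fun s x => s ++ x) ("" ++ s) = s ++ l.foldl (fun s x => s ++ x) ""
  rw [String.empty_append]
  conv_lhs => rw [← String.append_empty (s := s)]
  rw [foldl_str_append]

theorem join_append (l m : List String) :
    String.join (l ++ m) = String.join l ++ String.join m := by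
  induction l with
  | nil => simp [join_nil, String.empty_append]
  | cons h t ih => rw [List.cons_append, join_cons, join_cons, ih, String.append_assoc]

-- the inner td-appending fold only ever appends: prefixes factor out
theorem foldl_td_shift (pair : List (String × String)) (a b : String) :
    pair.foldl (fun c lv => c ++ detailsTd lv.1 lv.2) (a ++ b)
      = a ++ pair.foldl (fun c lv => c ++ detailsTd lv.1 lv.2) b := by
  induction pair generalizing b with
  | nil => rfl
  | cons h t ih => simp only [List.foldl_cons, String.append_assoc, ih]

-- A's loop body only appends to the accumulator
theorem detailsRowStep_shift (v : List (String × String)) (acc : String) (i : Int) :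
    detailsRowStep v acc i = acc ++ detailsRowStep v "" i := by
  simp only [detailsRowStep, foldl_td_shift, String.empty_append]
  split <;> simp [String.append_assoc]

theorem foldl_rowStep_shift (l : List Int) (v : List (String × String)) (a : String) :
    l.foldl (detailsRowStep v) a = a ++ l.foldl (detailsRowStep v) "" := by
  induction l generalizing a with
  | nil => simp
  | cons i t ih =>
    rw [List.foldl_cons, List.foldl_cons, ih, detailsRowStep_shift,
      ih (detailsRowStep v "" i), String.append_assoc]

-- range(0, n+2, 2) = 0 :: (each index of range(0, n, 2), shifted by 2)
theorem pyRange_two_peel (n : Nat) :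
    PySem.List.pyRange 0 ((n : Int) + 2) 2 = 0 :: (PySem.List.pyRange 0 (n : Int) 2).map (· + 2) := by
  rw [PySem.List.pyRange_of_pos _ _ (by norm_num), PySem.List.pyRange_of_pos _ _ (by norm_num)]
  have h1 : (if (0:Int) < (n:Int) + 2 then (((n:Int) + 2 - 0 + 2 - 1) / 2).toNat else 0)
      = (if (0:Int) < (n:Int) then (((n:Int) - 0 + 2 - 1) / 2).toNat else 0) + 1 := by
    split <;> split <;> omega
  rw [h1, List.range_succ_eq_map]
  simp only [List.map_cons, List.map_map]
  congr 1

-- slicing past the first two elements = slicing the tail-tail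
theorem slice_shift_two (p q : String × String) (t : List (String × String)) (i : Int) (hi : 0 ≤ i) :
    PySem.List.slice (p :: q :: t) (some (i + 2)) (some (i + 2 + 2))
      = PySem.List.slice t (some i) (some (i + 2)) := by
  obtain ⟨j, rfl⟩ := Int.eq_ofNat_of_zero_le hi
  have hL := PySem.List.slice_natCast_add (p :: q :: t) (j + 2) 2
  have hR := PySem.List.slice_natCast_add t j 2
  push_cast at hL hR
  rw [show ((j:Int) + 2 + 2) = ((j:Int) + 2) + 2 from rfl, hL, hR]
  show List.take 2 (List.drop j t) = _
  rfl

-- first iteration of A's loop on p :: q :: t produces the two-cell row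
theorem rowStep_head (p q : String × String) (t : List (String × String)) :
    detailsRowStep (p :: q :: t) "" 0 = altRow (altCell p, altCell q) := by
  simp only [detailsRowStep, altRow, altCell, detailsTd, zero_add,
    PySem.List.slice_zero_start, slice_take2, List.take_succ_cons,
    List.foldl_cons, List.length_cons]
  norm_num [String.append_assoc, String.empty_append]

-- A's index-stepping loop over v equals the pairs-of-cells view
theorem loop_eq_pairs : ∀ (v : List (String × String)),
    (PySem.List.pyRange 0 (v.length : Int) 2).foldl (detailsRowStep v) ""
      = String.join ((altPairs (v.map altCell)).map altRow)
  | [] => by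
    simp [PySem.List.pyRange_of_pos 0 0 (by norm_num : (0:Int) < 2), altPairs]
    rfl
  | [p] => by
    have hr : PySem.List.pyRange 0 (([p] : List (String × String)).length : Int) 2 = [0] := by
      rw [PySem.List.pyRange_of_pos _ _ (by norm_num : (0:Int) < 2)]
      norm_num
    rw [hr]
    simp only [List.foldl_cons, List.foldl_nil, List.map_cons, List.map_nil]
    show detailsRowStep [p] "" 0 = String.join [altRow (altCell p, "<td style=\"width:50%;\"></td>")]
    rw [join_cons, join_nil, String.append_empty]
    simp only [detailsRowStep, altRow, altCell, detailsTd, zero_add,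
      PySem.List.slice_zero_start, slice_take2, List.take_succ_cons,
      List.foldl_cons, List.length_cons]
    norm_num [String.append_assoc, String.empty_append]
  | p :: q :: t => by
    have hlen : ((p :: q :: t).length : Int) = (t.length : Int) + 2 := by
      simp
      ring
    rw [hlen, pyRange_two_peel, List.foldl_cons, List.foldl_map]
    have hstep : ∀ (acc : String), ∀ i ∈ PySem.List.pyRange 0 (t.length : Int) 2,
        detailsRowStep (p :: q :: t) acc (i + 2) = detailsRowStep t acc i := by
      intro acc i hi
      have h0 : 0 ≤ i := by
        rcases (PySem.List.mem_pyRange_iff_of_pos (by norm_num : (0:Int) < 2) i).mp hi with ⟨h, _⟩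
        exact h
      simp only [detailsRowStep, slice_shift_two p q t i h0]
    rw [PySem.List.foldl_congr_mem _ _ _ _ hstep, foldl_rowStep_shift, loop_eq_pairs t,
      rowStep_head]
    show _ = String.join (altRow (altCell p, altCell q) :: (altPairs (t.map altCell)).map altRow)
    rw [join_cons]

-- B's guarded step over rows = the unguarded step over the truthy-filtered rows
theorem foldl_altStep_filter (rows : List (String × String)) (st : List String × Option String) :
    rows.foldl altStep st = (rows.filter (fun lv => lv.2 != "")).foldl altStepV st := by
  induction rows generalizing st with
  | nil => rfl
  | cons h t ih =>
    by_cases hv : h.2 = ""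
    · simp [altStep, hv, ih]
    · simp [altStep, altStepV, hv, ih]

-- the state machine, started with no pending cell, emits exactly the pairs-of-cells rows
theorem machine_eq_pairs : ∀ (v : List (String × String)) (parts : List String),
    altFinish (v.foldl altStepV (parts, none))
      = parts ++ (altPairs (v.map altCell)).map altRow
  | [], parts => by simp [altFinish, altPairs]
  | [p], parts => by
    simp [altFinish, altStepV, altPairs, altRow, String.append_assoc]
  | p :: q :: t, parts => by
    have h2 : (p :: q :: t).foldl altStepV (parts, none)
        = t.foldl altStepV (parts ++ ["<tr>" ++ altCell p ++ altCell q ++ "</tr>"], none) := rfl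
    rw [h2, machine_eq_pairs t]
    simp [altPairs, altRow, String.append_assoc]

-- ===== VERDICT (by name: the statement is the Claim_ definition above) =====
theorem details_table_py_spec : Claim_equal_details_table_py := by
  intro rows _
  show details_table_py rows = details_table_py_alt rows
  simp only [details_table_py, details_table_py_alt]
  rw [loop_eq_pairs, foldl_altStep_filter, machine_eq_pairs, join_append, join_append,
    join_cons, join_nil, join_cons, join_nil, String.append_empty, String.append_empty,
    String.append_assoc]
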